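-- pv_equiv track=rewrite | github.com/bjourne/musicgen | tools/train-lstm-poly.py | guess_initial_pitch
-- ===== SOURCE A (Python) =====
-- INSN_REL_PITCH = 'R'
--
-- def guess_initial_pitch(pcode):
--     diffs = [arg for (cmd, arg) in pcode if cmd == INSN_REL_PITCH]
--     at_pitch, max_pitch, min_pitch = 0, 0, 0
--     for diff in diffs:
--         at_pitch += diff
--         max_pitch = max(at_pitch, max_pitch)
--         min_pitch = min(at_pitch, min_pitch)
--     return -min_pitch
-- ===== SOURCE B (Python) =====
-- INSN_REL_PITCH = 'R'
--
-- def guess_initial_pitch(pcode):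
--     # Right-to-left scan: `needed` is the headroom the remaining suffix of
--     # relative-pitch commands requires, via needed = max(0, needed - arg).
--     # No prefix sums and no minimum are ever formed.
--     needed = 0
--     for (cmd, arg) in reversed(pcode):
--         if cmd == INSN_REL_PITCH:
--             needed = max(0, needed - arg)
--     return needed
-- ===== Notes on version B (the rewrite author's own statement) =====
-- stated objective: alternative
-- what changed: B replaces A's forward pass over prefix sums with running min/max by a right-to-left scan maintaining a single 'needed headroom' value via needed = max(0, needed - arg), using the suffix recurrence g(d::rest) = max(0, g(rest) - d); no cumulative sums or minima are computed.
import Mathlib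
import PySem

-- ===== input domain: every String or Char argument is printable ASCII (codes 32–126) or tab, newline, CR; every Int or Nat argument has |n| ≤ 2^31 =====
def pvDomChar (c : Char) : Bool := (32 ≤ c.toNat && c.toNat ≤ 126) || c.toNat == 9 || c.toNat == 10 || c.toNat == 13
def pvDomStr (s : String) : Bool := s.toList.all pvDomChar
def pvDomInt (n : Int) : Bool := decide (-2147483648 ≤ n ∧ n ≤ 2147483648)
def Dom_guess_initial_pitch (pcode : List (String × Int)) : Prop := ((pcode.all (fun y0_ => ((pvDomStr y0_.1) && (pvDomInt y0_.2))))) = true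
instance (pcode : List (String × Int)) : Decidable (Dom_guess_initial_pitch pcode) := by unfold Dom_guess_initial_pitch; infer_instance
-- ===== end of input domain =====

-- B replaces A's forward prefix-sum/min/max pass by a right-to-left scan keeping one
-- "needed headroom" value (needed = max 0 (needed - arg)); same return value, no min of sums.

-- ===== PORT A =====
def guess_initial_pitch (pcode : List (String × Int)) : Int :=
  let diffs := (pcode.filter (fun p => p.1 == "R")).map Prod.snd;
  let st := diffs.foldl
    (fun (s : Int × Int × Int) diff =>
      let at_pitch := s.1 + diff
      (at_pitch, max at_pitch s.2.1, min at_pitch s.2.2))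
    (0, 0, 0);
  -st.2.2

-- ===== PORT B =====
def guess_initial_pitch_alt (pcode : List (String × Int)) : Int :=
  pcode.reverse.foldl
    (fun (needed : Int) p => if p.1 == "R" then max 0 (needed - p.2) else needed)
    0

-- ===== PRECONDITION & SPEC =====
def Spec_guess_initial_pitch (pcode : List (String × Int)) (out : Int) : Prop := out = guess_initial_pitch_alt pcode
instance (pcode : List (String × Int)) (out : Int) : Decidable (Spec_guess_initial_pitch pcode out) := by unfold Spec_guess_initial_pitch; infer_instance

-- ===== CLAIM (what is proved, stated in full; the proofs are below) =====
def Claim_equal_guess_initial_pitch : Prop := ∀ (pcode : List (String × Int)), Dom_guess_initial_pitch pcode → Spec_guess_initial_pitch pcode (guess_initial_pitch pcode)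

-- ===== LEMMAS AND PROOFS =====

-- A's loop body, named for the invariant lemma.
def pvStepA (s : Int × Int × Int) (diff : Int) : Int × Int × Int :=
  let at_pitch := s.1 + diff
  (at_pitch, max at_pitch s.2.1, min at_pitch s.2.2)

-- B's suffix recurrence on the filtered diff list.
def pvNeed : List Int → Int
  | [] => 0
  | d :: rest => max 0 (pvNeed rest - d)

theorem pvNeed_nonneg : ∀ ds : List Int, 0 ≤ pvNeed ds
  | [] => le_refl 0
  | _ :: _ => le_max_left 0 _

-- B's reverse-foldl over pcode equals pvNeed of the filtered diffs.
theorem pv_alt_eq_need : ∀ (l : List (String × Int)) (n : Int),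
    l.reverse.foldl
      (fun (needed : Int) p => if p.1 == "R" then max 0 (needed - p.2) else needed) n
    = (fun acc => ((l.filter (fun p => p.1 == "R")).map Prod.snd).foldr
        (fun d m => max 0 (m - d)) acc) n := by
  intro l
  induction l with
  | nil => intro n; rfl
  | cons p l ih =>
    intro n
    by_cases hR : p.1 == "R"
    · simp only [List.reverse_cons, List.foldl_append, List.foldl_cons, List.foldl_nil,
        List.filter_cons, hR, if_true, List.map_cons, List.foldr_cons]
      rw [ih]
    · simp only [List.reverse_cons, List.foldl_append, List.foldl_cons, List.foldl_nil,
        List.filter_cons, hR, Bool.false_eq_true, if_false]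
      rw [ih]

theorem pvNeed_eq_foldr : ∀ ds : List Int, pvNeed ds = ds.foldr (fun d m => max 0 (m - d)) 0
  | [] => rfl
  | d :: rest => by simp [pvNeed, pvNeed_eq_foldr rest]

-- Core invariant: A's running minimum after the whole diff list, from state (a, m, mn)
-- with mn ≤ a, is min mn (a - pvNeed ds).
theorem pv_min_eq : ∀ (ds : List Int) (a m mn : Int), mn ≤ a →
    (ds.foldl pvStepA (a, m, mn)).2.2 = min mn (a - pvNeed ds) := by
  intro ds
  induction ds with
  | nil => intro a m mn h; simp [pvNeed]; omega
  | cons d rest ih =>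
    intro a m mn h
    have hrec := ih (a + d) (max (a + d) m) (min (a + d) mn) (min_le_left _ _)
    have hnn := pvNeed_nonneg rest
    simp only [List.foldl_cons, pvStepA] at *
    rw [hrec]
    simp [pvNeed]
    omega

theorem guess_initial_pitch_spec : Claim_equal_guess_initial_pitch := by
  unfold Claim_equal_guess_initial_pitch
  intro pcode _
  unfold Spec_guess_initial_pitch guess_initial_pitch guess_initial_pitch_alt
  rw [pv_alt_eq_need]
  show -(List.foldl pvStepA (0, 0, 0) ((pcode.filter (fun p => p.1 == "R")).map Prod.snd)).2.2 = _
  rw [pv_min_eq _ 0 0 0 (le_refl 0)]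
  simp only [← pvNeed_eq_foldr]
  have := pvNeed_nonneg ((pcode.filter (fun p => p.1 == "R")).map Prod.snd)
  omega
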